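-- pv_equiv track=rewrite | github.com/gunagg/Dance2Music | offline/generate_music_BS.py | process
-- ===== SOURCE A (Python) =====
-- def process(states):
--     new_states = []
--     i = 0
--     while i < len(states):
--         new_states.append(states[i])
--         j = i + 1
--         while j < len(states) and states[j] == states[i]:
--             new_states.append(-2)
--             j += 1
--         i = j
--
--     return new_states
-- ===== SOURCE B (Python) =====
-- def process(states):
--     new_states = []
--     ref = None
--     for x in states:
--         if ref is not None and x == ref:
--             new_states.append(-2)
--         else:
--             new_states.append(x)
--             ref = x
--     return new_states
-- ===== Notes on version B (the rewrite author's own statement) =====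
-- stated objective: simpler
-- what changed: Replaced the index-driven nested while loops (outer scan plus inner run-consuming scan) by one flat for-loop that keeps the current run's reference value and appends -2 on a repeat.
import Mathlib
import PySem

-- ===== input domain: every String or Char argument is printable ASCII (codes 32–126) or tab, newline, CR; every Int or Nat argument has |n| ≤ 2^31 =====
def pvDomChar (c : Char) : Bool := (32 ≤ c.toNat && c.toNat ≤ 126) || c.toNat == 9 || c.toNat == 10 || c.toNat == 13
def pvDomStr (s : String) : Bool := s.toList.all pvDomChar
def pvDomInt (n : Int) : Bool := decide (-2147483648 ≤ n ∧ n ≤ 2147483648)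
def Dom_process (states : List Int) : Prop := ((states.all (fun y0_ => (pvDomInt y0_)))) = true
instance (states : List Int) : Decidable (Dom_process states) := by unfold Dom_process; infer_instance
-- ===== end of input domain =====

-- B replaces A's nested while loops (inner loop consuming each run by index) with one
-- flat pass maintaining the current run's reference value; same O(n) cost, simpler.


-- ===== PORT A =====
-- inner while loop: 'while j < len(states) and states[j] == states[i]: append(-2); j += 1'
-- returns the appended -2s together with the final j; fuel only makes the recursion
-- structural (states.length fuel always suffices, the loop runs at most len(states)-j times)
def innerA (states : List Int) (v : Int) (fuel : Nat) (j : Nat) : List Int × Nat :=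
  match fuel with
  | 0 => ([], j)
  | f + 1 =>
    if h : j < states.length then
      if states[j] = v then
        let r := innerA states v f (j + 1)
        (-2 :: r.1, r.2)
      else ([], j)
    else ([], j)

-- outer while loop: 'while i < len(states): append(states[i]); <inner>; i = j'
def outerA (states : List Int) (fuel : Nat) (i : Nat) : List Int :=
  match fuel with
  | 0 => []
  | f + 1 =>
    if h : i < states.length then
      let r := innerA states states[i] states.length (i + 1)
      states[i] :: (r.1 ++ outerA states f r.2)
    else []

def process (states : List Int) : List Int := outerA states states.length 0

-- ===== PORT B =====
-- one pass; state = (new_states so far, ref = current run's reference value, None before first elem)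
def bStep (p : List Int × Option Int) (x : Int) : List Int × Option Int :=
  match p.2 with
  | some r => if x = r then (p.1 ++ [-2], p.2) else (p.1 ++ [x], some x)
  | none => (p.1 ++ [x], some x)

def process_alt (states : List Int) : List Int :=
  (states.foldl bStep ([], none)).1

-- ===== PRECONDITION & SPEC =====
def Spec_process (states : List Int) (out : List Int) : Prop := out = process_alt states
instance (states : List Int) (out : List Int) : Decidable (Spec_process states out) := by unfold Spec_process; infer_instance

-- ===== CLAIM (what is proved, stated in full; the proofs are below) =====
def Claim_equal_process : Prop := ∀ (states : List Int), Dom_process states → Spec_process states (process states)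

-- ===== LEMMAS AND PROOFS =====

-- common characterisation: output after a run head with reference v
def emit (v : Int) : List Int → List Int
  | [] => []
  | x :: xs => if x = v then -2 :: emit v xs else x :: emit x xs

lemma keyA : ∀ (n : Nat) (states : List Int) (v : Int) (j fi fo : Nat),
    states.length - j ≤ n → states.length - j ≤ fi → states.length - j ≤ fo →
    (innerA states v fi j).1 ++ outerA states fo (innerA states v fi j).2 = emit v (states.drop j) := by
  intro n
  induction n with
  | zero =>
      intro states v j fi fo hn _ _
      have hj : states.length ≤ j := by omega
      have h1 : innerA states v fi j = ([], j) := by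
        cases fi with
        | zero => rfl
        | succ f => unfold innerA; simp [Nat.not_lt.mpr hj]
      have h2 : outerA states fo j = [] := by
        cases fo with
        | zero => rfl
        | succ f => unfold outerA; simp [Nat.not_lt.mpr hj]
      simp [h1, h2, List.drop_eq_nil_of_le hj, emit]
  | succ n ih =>
      intro states v j fi fo hn hfi hfo
      by_cases h : j < states.length
      · have hdrop : states.drop j = states[j] :: states.drop (j + 1) :=
          List.drop_eq_getElem_cons h
        obtain ⟨f, rfl⟩ : ∃ f, fi = f + 1 := ⟨fi - 1, by omega⟩
        by_cases he : states[j] = v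
        · have h1 : innerA states v (f + 1) j =
              (-2 :: (innerA states v f (j + 1)).1, (innerA states v f (j + 1)).2) := by
            conv_lhs => unfold innerA
            simp [h, he]
          rw [h1]
          simp only [List.cons_append]
          rw [ih states v (j + 1) f fo (by omega) (by omega) (by omega), hdrop, emit, if_pos he]
        · have h1 : innerA states v (f + 1) j = ([], j) := by
            conv_lhs => unfold innerA
            simp [h, he]
          rw [h1]
          simp only [List.nil_append]
          obtain ⟨g, rfl⟩ : ∃ g, fo = g + 1 := ⟨fo - 1, by omega⟩
          have h2 : outerA states (g + 1) j = states[j] ::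
              ((innerA states states[j] states.length (j + 1)).1 ++
                outerA states g (innerA states states[j] states.length (j + 1)).2) := by
            conv_lhs => unfold outerA
            simp [h]
          rw [h2,
            ih states states[j] (j + 1) states.length g (by omega) (by omega) (by omega),
            hdrop, emit, if_neg he]
      · have hj : states.length ≤ j := by omega
        have h1 : innerA states v fi j = ([], j) := by
          cases fi with
          | zero => rfl
          | succ f => unfold innerA; simp [Nat.not_lt.mpr hj]
        have h2 : outerA states fo j = [] := by
          cases fo with
          | zero => rfl
          | succ f => unfold outerA; simp [Nat.not_lt.mpr hj]
        simp [h1, h2, List.drop_eq_nil_of_le hj, emit]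

lemma keyB : ∀ (xs : List Int) (acc : List Int) (v : Int),
    (List.foldl bStep (acc, some v) xs).1 = acc ++ emit v xs := by
  intro xs
  induction xs with
  | nil => intro acc v; simp [emit]
  | cons x xs ih =>
      intro acc v
      simp only [List.foldl_cons, bStep]
      by_cases he : x = v
      · rw [if_pos he, ih, emit, if_pos he, List.append_assoc]; rfl
      · rw [if_neg he, ih, emit, if_neg he, List.append_assoc]; rfl

-- ===== VERDICT (by name: the statement is the Claim_ definition above) =====
theorem process_spec : Claim_equal_process := by
  intro states _
  unfold Spec_process process process_alt
  cases states with
  | nil => simp [outerA, List.foldl]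
  | cons x xs =>
      have hB : (List.foldl bStep ([], none) (x :: xs)).1 = x :: emit x xs := by
        simp only [List.foldl_cons, bStep]
        rw [keyB]
        rfl
      rw [hB]
      have hA : outerA (x :: xs) (x :: xs).length 0 = x ::
          ((innerA (x :: xs) x (x :: xs).length 1).1 ++
            outerA (x :: xs) xs.length (innerA (x :: xs) x (x :: xs).length 1).2) := by
        conv_lhs => unfold outerA
        simp
      rw [hA]
      have := keyA (x :: xs).length (x :: xs) x 1 (x :: xs).length xs.length
        (by simp) (by simp) (by simp)
      rw [this]
      rfl
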